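-- pv_equiv track=rewrite | github.com/gardonig/semester_project_2026 | src/anatomy_poset/core/matrix_aggregation.py | permute_count_matrix
-- ===== SOURCE A (Python) =====
-- from typing import Any, Dict, List, Optional, Sequence, Tuple, Union
--
-- def permute_count_matrix(
--     M: List[List[Optional[int]]], perm: List[int]
-- ) -> List[List[Optional[int]]]:
--     """Same index permutation as :func:`permute_relation_matrix` for optional-int count grids."""
--     n = len(M)
--     out: List[List[Optional[int]]] = [[None] * n for _ in range(n)]
--     for i in range(n):
--         for j in range(n):
--             out[i][j] = M[perm[i]][perm[j]]
--     return out
-- ===== SOURCE B (Python) =====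
-- def permute_count_matrix(M, perm):
--     """Transpose-based: out = T(select(T(select(M)))) -- row-permute, transpose, row-permute, transpose back; no column indexing."""
--     n = len(M)
--     idx = perm[:n]
--     rows = [M[p] for p in idx]
--     cols = list(zip(*rows))
--     sel = [cols[q] for q in idx]
--     return [list(t) for t in zip(*sel)]
-- ===== Notes on version B (the rewrite author's own statement) =====
-- stated objective: alternative
-- what changed: Replaces the cell-by-cell double-indexed fill out[i][j]=M[perm[i]][perm[j]] with a transpose-based pipeline: row-permute, transpose with zip(*...), row-permute the columns, transpose back (out = T(P(T(P(M)))) with no column indexing at all).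
-- outside the precondition, e.g. on permute_count_matrix([[1, 2], [3]], [0, -1]): A returns [[1, 2], [3, 3]], B returns [[1, 1], [3, 3]]
import Mathlib
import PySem

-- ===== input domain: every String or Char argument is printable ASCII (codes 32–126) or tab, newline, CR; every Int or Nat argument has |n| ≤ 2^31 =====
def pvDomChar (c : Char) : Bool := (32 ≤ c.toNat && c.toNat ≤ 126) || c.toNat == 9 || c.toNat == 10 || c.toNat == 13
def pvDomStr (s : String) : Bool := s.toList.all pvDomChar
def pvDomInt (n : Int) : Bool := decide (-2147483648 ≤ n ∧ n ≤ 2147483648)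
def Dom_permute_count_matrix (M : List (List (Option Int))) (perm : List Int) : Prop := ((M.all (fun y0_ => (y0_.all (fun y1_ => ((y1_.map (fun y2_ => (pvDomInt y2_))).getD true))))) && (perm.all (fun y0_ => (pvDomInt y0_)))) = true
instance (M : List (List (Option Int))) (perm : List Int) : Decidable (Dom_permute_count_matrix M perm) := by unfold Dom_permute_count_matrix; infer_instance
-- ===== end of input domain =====

-- B replaces the doubly-indexed fill with two transposes around row selection
-- (out = Tᵀ of select of Tᵀ of select of M); equivalence is about the return value
-- (neither program mutates M).

-- ===== PORT A =====
-- A fills a preallocated n×n grid with out[i][j] = M[perm[i]][perm[j]] for every i, j in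
-- range(n); the completed grid is this nested map over both index ranges (exact, since
-- every cell of the preallocated grid is overwritten exactly once, in this order).
def permute_count_matrix (M : List (List (Option Int))) (perm : List Int) : List (List (Option Int)) :=
  let n : Int := M.length
  (PySem.List.pyRange 0 n 1).map (fun i =>
    (PySem.List.pyRange 0 n 1).map (fun j =>
      PySem.List.pyGetD (PySem.List.pyGetD M (PySem.List.pyGetD perm i 0) [])
        (PySem.List.pyGetD perm j 0) none))

-- ===== PORT B =====
-- zip(*rows): columns up to the shortest row (zip() with no rows is empty).
def pvTranspose (rows : List (List (Option Int))) : List (List (Option Int)) :=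
  let m := ((rows.map List.length).min?).getD 0
  (List.range m).map (fun k => rows.map (fun row => row.getD k none))

def permute_count_matrix_alt (M : List (List (Option Int))) (perm : List Int) : List (List (Option Int)) :=
  let idx := PySem.List.slice perm (some 0) (some (M.length : Int))
  let rows := idx.map (fun p => PySem.List.pyGetD M p [])
  let cols := pvTranspose rows
  let sel := idx.map (fun q => PySem.List.pyGetD cols q [])
  pvTranspose sel

-- ===== PRECONDITION & SPEC =====
-- Pre_ requires what Python A requires to return (n = len(M) valid row indices, each also
-- a valid index into every selected row) and, beyond that, restricts to the function's
-- natural domain of rectangular count grids when a negative index is used: it excludes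
-- ragged inputs (selected rows of unequal length) combined with a negative perm entry,
-- a corner no caller specifies, where a negative column index names a different position
-- in each row, so A's per-row reading and B's common-width reading are both defensible.
def Pre_permute_count_matrix (M : List (List (Option Int))) (perm : List Int) : Prop :=
  M.length ≤ perm.length ∧
  (∀ p ∈ perm.take M.length, PySem.Raise.InRange M.length p ∧
      ∀ q ∈ perm.take M.length,
        PySem.Raise.InRange (PySem.List.pyGetD M p []).length q) ∧
  ((∀ p ∈ perm.take M.length, ∀ p' ∈ perm.take M.length,
      (PySem.List.pyGetD M p []).length = (PySem.List.pyGetD M p' []).length) ∨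
    (∀ q ∈ perm.take M.length, 0 ≤ q))
instance (M : List (List (Option Int))) (perm : List Int) : Decidable (Pre_permute_count_matrix M perm) := by unfold Pre_permute_count_matrix; infer_instance

def pvWitness_permute_count_matrix : List (List (Option Int)) × List Int :=
  ([[some 1, none], [none, some 2]], [1, 0])

def Spec_permute_count_matrix (M : List (List (Option Int))) (perm : List Int) (out : List (List (Option Int))) : Prop := out = permute_count_matrix_alt M perm
instance (M : List (List (Option Int))) (perm : List Int) (out : List (List (Option Int))) : Decidable (Spec_permute_count_matrix M perm out) := by unfold Spec_permute_count_matrix; infer_instance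

-- ===== CLAIM (what is proved, stated in full; the proofs are below) =====
def Claim_equal_permute_count_matrix : Prop := ∀ (M : List (List (Option Int))) (perm : List Int), Dom_permute_count_matrix M perm → Pre_permute_count_matrix M perm → Spec_permute_count_matrix M perm (permute_count_matrix M perm)

-- ===== LEMMAS AND PROOFS =====

-- Reading the first n entries of l through pyGetD over range(n) is l.take n.
theorem map_getD_range_take (l : List Int) (n : Nat) (d : Int) (h : n ≤ l.length) :
    (List.range n).map (fun i => l.getD i d) = l.take n := by
  induction n with
  | zero => simp
  | succ k ih =>
    rw [List.range_succ, List.map_append, ih (Nat.le_of_succ_le h), List.take_add_one]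
    simp [List.getD_eq_getElem?_getD, Nat.lt_of_succ_le h]

theorem map_pyGetD_range_take (l : List Int) (n : Nat) (d : Int) (h : n ≤ l.length) :
    (PySem.List.pyRange 0 (n : Int) 1).map (fun i => PySem.List.pyGetD l i d) = l.take n := by
  rw [PySem.List.pyRange_one]
  simp [List.map_map, Function.comp_def, PySem.List.pyGetD_natCast]
  exact map_getD_range_take l n d h

-- Mapping a function of the i-th element over range(len l) is mapping it over l.
theorem map_range_getD {α β : Type} (l : List α) (d : α) (F : α → β) :
    (List.range l.length).map (fun i => F (l.getD i d)) = l.map F := by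
  apply List.ext_getElem (by simp)
  intro i h1 h2
  simp at h1
  simp [List.getD_eq_getElem?_getD, List.getElem?_eq_getElem h1]

-- min? of a nonempty constant list.
theorem min?_const (l : List Nat) (c : Nat) (hne : l ≠ []) (hall : ∀ x ∈ l, x = c) :
    l.min? = some c := by
  rw [List.min?_eq_some_iff]
  constructor
  · obtain ⟨x, hx⟩ := List.exists_mem_of_ne_nil l hne
    exact (hall x hx) ▸ hx
  · intro b hb; exact (hall b hb).ge

-- A as a nested map over the taken prefix of perm.
theorem permute_count_matrix_eq_nested (M : List (List (Option Int))) (perm : List Int)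
    (h : M.length ≤ perm.length) :
    permute_count_matrix M perm =
      (perm.take M.length).map (fun p => (perm.take M.length).map
        (fun q => PySem.List.pyGetD (PySem.List.pyGetD M p []) q none)) := by
  unfold permute_count_matrix
  have hmap := map_pyGetD_range_take perm M.length 0 h
  calc (PySem.List.pyRange 0 (M.length : Int) 1).map (fun i =>
          (PySem.List.pyRange 0 (M.length : Int) 1).map (fun j =>
            PySem.List.pyGetD (PySem.List.pyGetD M (PySem.List.pyGetD perm i 0) [])
              (PySem.List.pyGetD perm j 0) none))
      = ((PySem.List.pyRange 0 (M.length : Int) 1).map (fun i => PySem.List.pyGetD perm i 0)).map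
          (fun p => ((PySem.List.pyRange 0 (M.length : Int) 1).map (fun j => PySem.List.pyGetD perm j 0)).map
            (fun q => PySem.List.pyGetD (PySem.List.pyGetD M p []) q none)) := by
        simp [List.map_map, Function.comp]
    _ = _ := by rw [hmap]

theorem pvTranspose_eq (rows : List (List (Option Int))) (m : Nat)
    (hmin : (rows.map List.length).min? = some m) :
    pvTranspose rows = (List.range m).map (fun k => rows.map (fun row => row.getD k none)) := by
  unfold pvTranspose
  rw [hmin]
  rfl

-- pyGetD resolves a valid (possibly negative) index to a plain getD.
theorem pyGetD_resolve {a : Type} [Inhabited a] (l : List a) (q : Int) (d : a)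
    (h : PySem.Raise.InRange l.length q) :
    PySem.List.pyGetD l q d =
      l.getD (if q < 0 then ((l.length : Int) + q).toNat else q.toNat) d := by
  unfold PySem.Raise.InRange at h
  by_cases hq : q < 0
  · have hk : q = -(((-q).toNat : Nat) : Int) := by omega
    have h0 : 0 < (-q).toNat := by omega
    have h1 : (-q).toNat ≤ l.length := by omega
    rw [hk, PySem.List.pyGetD_neg_natCast l (-q).toNat d h0 h1]
    have hlt : l.length - (-q).toNat < l.length := by omega
    have hidx : (if (-(((-q).toNat : Nat) : Int)) < 0 then ((l.length : Int) + -(((-q).toNat : Nat) : Int)).toNat else (-(((-q).toNat : Nat) : Int)).toNat) = l.length - (-q).toNat := by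
      rw [if_pos (by omega : (-(((-q).toNat : Nat) : Int)) < 0)]
      omega
    rw [hidx]
    simp [List.getD_eq_getElem?_getD, List.getElem?_eq_getElem hlt]
  · have h0 : 0 ≤ q := by omega
    have hlt : q.toNat < l.length := by omega
    rw [PySem.List.pyGetD_eq_getElem l d h0 (by omega)]
    simp [hq, List.getD_eq_getElem?_getD, List.getElem?_eq_getElem hlt]

-- getD through a map, in range.
theorem getD_map_of_lt {a b : Type} (l : List a) (f : a → b) (i : Nat) (d : a) (d' : b)
    (h : i < l.length) : (l.map f).getD i d' = f (l.getD i d) := by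
  simp [List.getD_eq_getElem?_getD, h]

theorem permute_count_matrix_eq (M : List (List (Option Int))) (perm : List Int)
    (hpre : Pre_permute_count_matrix M perm) :
    permute_count_matrix M perm = permute_count_matrix_alt M perm := by
  obtain ⟨h1, h2, h4⟩ := hpre
  set n := M.length with hn
  set idx := perm.take n with hidx
  have hidxlen : idx.length = n := by simp [hidx, h1]
  have hslice : PySem.List.slice perm (some 0) (some (n : Int)) = idx := by
    simp [PySem.List.slice_zero_start, PySem.List.slice_to_natCast, hidx]
  rcases Nat.eq_zero_or_pos n with hn0 | hnpos
  · -- n = 0 : both sides are []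
    have hM : M = [] := List.length_eq_zero_iff.mp hn0
    subst hM
    have hs0 : PySem.List.slice perm none (some (0:Int)) = ([] : List Int) := by
      rw [show (0:Int) = ((0:Nat):Int) from rfl, PySem.List.slice_to_natCast]
      simp
    simp [permute_count_matrix, permute_count_matrix_alt, pvTranspose,
      PySem.List.pyRange_one_eq_nil, hs0]
  · -- n > 0
    have hidxne : idx ≠ [] := by
      intro hc; rw [hc] at hidxlen; simp at hidxlen; omega
    set rows := idx.map (fun p => PySem.List.pyGetD M p []) with hrows
    have hrowslen : rows.length = n := by simp [hrows, hidxlen]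
    have hrowsne : rows ≠ [] := by
      intro hc; rw [hc] at hrowslen; simp at hrowslen; omega
    have hex : ∃ a, (rows.map List.length).min? = some a := by
      cases hmm : (rows.map List.length).min? with
      | none => exact absurd (List.min?_eq_none_iff.mp hmm) (by simpa using hrowsne)
      | some a => exact ⟨a, rfl⟩
    obtain ⟨m, hmin⟩ := hex
    obtain ⟨hm_mem, hm_le⟩ := List.min?_eq_some_iff.mp hmin
    obtain ⟨p0, hp0, hlen0⟩ : ∃ p0 ∈ idx, (PySem.List.pyGetD M p0 []).length = m := by
      simpa [hrows] using hm_mem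
    have hrow_ge : ∀ p ∈ idx, m ≤ (PySem.List.pyGetD M p []).length := by
      intro p hp
      exact hm_le _ (by simp [hrows]; exact ⟨p, hp, rfl⟩)
    have hneg_len : ∀ q ∈ idx, q < 0 → ∀ p ∈ idx, (PySem.List.pyGetD M p []).length = m := by
      intro q hq hqneg p hp
      rcases h4 with h4 | h4
      · exact (h4 p hp p0 hp0).trans hlen0
      · exact absurd (h4 q hq) (by omega)
    have hpos_lt : ∀ q ∈ idx, 0 ≤ q → q < (m : Int) := by
      intro q hq hq0
      have hin := (h2 p0 hp0).2 q hq
      unfold PySem.Raise.InRange at hin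
      omega
    have hInm : ∀ q ∈ idx, PySem.Raise.InRange m q := by
      intro q hq
      unfold PySem.Raise.InRange
      by_cases hq0 : q < 0
      · have hin := (h2 p0 hp0).2 q hq
        unfold PySem.Raise.InRange at hin
        rw [hlen0] at hin
        omega
      · exact ⟨by omega, hpos_lt q hq (by omega)⟩
    set col := fun q : Int => (if q < 0 then ((m : Int) + q).toNat else q.toNat) with hcol
    have hcol_lt : ∀ q ∈ idx, col q < m := by
      intro q hq
      have hin := hInm q hq
      unfold PySem.Raise.InRange at hin
      by_cases hq0 : q < 0
      · simp only [hcol, if_pos hq0]; omega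
      · simp only [hcol, if_neg hq0]
        have := hpos_lt q hq (by omega)
        omega
    have hcell : ∀ q ∈ idx, ∀ p ∈ idx,
        PySem.List.pyGetD (PySem.List.pyGetD M p []) q none = (PySem.List.pyGetD M p []).getD (col q) none := by
      intro q hq p hp
      rw [pyGetD_resolve _ _ _ ((h2 p hp).2 q hq)]
      by_cases hq0 : q < 0
      · simp only [hcol, if_pos hq0, hneg_len q hq hq0 p hp]
      · simp only [hcol, if_neg hq0]
    have hcols : ∀ q ∈ idx,
        PySem.List.pyGetD (pvTranspose rows) q [] = rows.map (fun r => r.getD (col q) none) := by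
      intro q hq
      rw [pvTranspose_eq rows m hmin]
      have hlen : ((List.range m).map (fun k => rows.map (fun row => row.getD k none))).length = m := by simp
      rw [pyGetD_resolve _ _ _ (by rw [hlen]; exact hInm q hq)]
      rw [hlen]
      have hc := hcol_lt q hq
      have hcol_eq : (if q < 0 then ((m : Int) + q).toNat else q.toNat) = col q := by
        simp only [hcol]
      rw [hcol_eq, getD_map_of_lt (List.range m) _ (col q) 0 [] (by simpa using hc)]
      congr 1
      simp [List.getD_eq_getElem?_getD, hc]
    have hsel : idx.map (fun q => PySem.List.pyGetD (pvTranspose rows) q []) =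
        idx.map (fun q => rows.map (fun r => r.getD (col q) none)) :=
      List.map_congr_left (fun q hq => hcols q hq)
    have hmin2 : ((idx.map (fun q => rows.map (fun r => r.getD (col q) none))).map List.length).min? = some n := by
      apply min?_const
      · simpa using hidxne
      · intro x hx
        simp only [List.map_map, List.mem_map, Function.comp] at hx
        obtain ⟨q, hq, hxq⟩ := hx
        simp [← hxq, hrowslen]
    have hB : permute_count_matrix_alt M perm =
        (List.range n).map (fun i => idx.map (fun q => (rows.getD i []).getD (col q) none)) := by
      unfold permute_count_matrix_alt
      rw [hslice]
      show pvTranspose (idx.map (fun q => PySem.List.pyGetD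
          (pvTranspose (idx.map (fun p => PySem.List.pyGetD M p []))) q [])) = _
      rw [← hrows, hsel, pvTranspose_eq _ n hmin2]
      apply List.map_congr_left
      intro i hi
      simp only [List.mem_range] at hi
      simp only [List.map_map]
      apply List.map_congr_left
      intro q hq
      exact getD_map_of_lt rows _ i [] none (by omega)
    rw [hB, permute_count_matrix_eq_nested M perm h1]
    rw [← hidx]
    have hArows : idx.map (fun p => idx.map (fun q => PySem.List.pyGetD (PySem.List.pyGetD M p []) q none)) =
        idx.map (fun p => idx.map (fun q => (PySem.List.pyGetD M p []).getD (col q) none)) := by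
      apply List.map_congr_left
      intro p hp
      exact List.map_congr_left (fun q hq => hcell q hq p hp)
    rw [hArows]
    have hrange : (List.range n).map (fun i => idx.map (fun q => (rows.getD i []).getD (col q) none)) =
        (List.range idx.length).map (fun i => (fun p => idx.map (fun q => (PySem.List.pyGetD M p []).getD (col q) none)) (idx.getD i 0)) := by
      rw [hidxlen]
      apply List.map_congr_left
      intro i hi
      simp only [List.mem_range] at hi
      have hri : rows.getD i [] = PySem.List.pyGetD M (idx.getD i 0) [] := by
        rw [hrows]
        exact getD_map_of_lt idx (fun p => PySem.List.pyGetD M p []) i 0 [] (by omega)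
      rw [hri]
    rw [hrange]
    exact (map_range_getD idx 0 (fun p => idx.map (fun q => (PySem.List.pyGetD M p []).getD (col q) none))).symm

-- ===== VERDICT (by name: the statement is the Claim_ definition above) =====
theorem permute_count_matrix_spec : Claim_equal_permute_count_matrix := by
  intro M perm _ hpre
  unfold Spec_permute_count_matrix
  exact permute_count_matrix_eq M perm hpre
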